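-- pv_equiv track=rewrite | github.com/novioleo/Savior | Utils/GeometryUtils.py | concentric_circle_delete_duplicated
-- ===== SOURCE A (Python) =====
-- def concentric_circle_delete_duplicated(_all_centers, _down_scale_ratio=4):
--     """
--     简易的二维坐标去重
--     相当于将相邻坐标放到一个格子里
--     """
--     tile_grids = dict()
--     to_return_optimized_centers = []
--     for m_x, m_y in _all_centers:
--         m_x_downscaled, m_y_downscaled = m_x // _down_scale_ratio, m_y // _down_scale_ratio
--         m_downscale_name = '%d_%d' % (m_x_downscaled, m_y_downscaled)
--         if m_downscale_name not in tile_grids: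
--             tile_grids[m_downscale_name] = (m_x, m_y, 1)
--         else:
--             sum_x, sum_y, sum_counter = tile_grids[m_downscale_name]
--             tile_grids[m_downscale_name] = (sum_x + m_x, sum_y + m_y, sum_counter + 1)
--     for _, (m_sum_x, m_sum_y, m_sum_counter) in tile_grids.items():
--         to_return_optimized_centers.append((m_sum_x // m_sum_counter, m_sum_y // m_sum_counter))
--     return to_return_optimized_centers
-- ===== SOURCE B (Python) =====
-- def concentric_circle_delete_duplicated(_all_centers, _down_scale_ratio=4):
--     # Group-by-cell via filtering: list the distinct downscaled cells in first-appearance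
--     # order, then for each cell collect its members in one filter pass and average them.
--     cells = [(m_x // _down_scale_ratio, m_y // _down_scale_ratio) for m_x, m_y in _all_centers]
--     optimized_centers = []
--     for cell in dict.fromkeys(cells):
--         members = [(m_x, m_y) for m_x, m_y in _all_centers
--                    if (m_x // _down_scale_ratio, m_y // _down_scale_ratio) == cell]
--         optimized_centers.append((sum(m[0] for m in members) // len(members),
--                                   sum(m[1] for m in members) // len(members)))
--     return optimized_centers
-- ===== Notes on version B (the rewrite author's own statement) =====
-- stated objective: alternative
-- what changed: Replaces A's one-pass dict of running (sum_x, sum_y, count) accumulators with a two-phase group-by: list the distinct downscaled cells in first-appearance order, then for each cell gather its members with a filter pass and average them in batch.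
import Mathlib
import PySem

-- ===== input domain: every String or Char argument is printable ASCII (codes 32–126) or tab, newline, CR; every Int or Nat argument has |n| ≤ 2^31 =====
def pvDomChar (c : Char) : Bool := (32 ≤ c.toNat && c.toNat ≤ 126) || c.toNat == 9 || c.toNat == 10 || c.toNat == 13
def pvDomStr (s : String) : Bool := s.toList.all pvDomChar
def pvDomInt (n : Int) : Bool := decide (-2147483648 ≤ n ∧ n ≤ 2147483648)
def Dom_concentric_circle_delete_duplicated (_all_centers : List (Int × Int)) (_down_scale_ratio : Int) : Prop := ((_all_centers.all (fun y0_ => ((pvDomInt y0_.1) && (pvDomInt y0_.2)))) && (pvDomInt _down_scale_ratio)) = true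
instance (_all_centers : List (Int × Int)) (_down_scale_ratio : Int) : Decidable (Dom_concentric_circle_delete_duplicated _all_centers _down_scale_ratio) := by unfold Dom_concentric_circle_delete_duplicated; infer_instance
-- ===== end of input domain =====

-- B replaces A's streaming dict of running (sum_x, sum_y, count) accumulators with a two-phase
-- group-by: distinct cells in first-appearance order, then a filter pass and a batch average per
-- cell (objective: alternative decomposition, not faster).

-- ===== PORT A =====
def concentric_circle_delete_duplicated (_all_centers : List (Int × Int)) (_down_scale_ratio : Int) : List (Int × Int) :=
  let tile_grids : PySem.Dict String (Int × Int × Int) :=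
    _all_centers.foldl (fun d p =>
      let m_x_downscaled := PySem.Int.floordiv p.1 _down_scale_ratio
      let m_y_downscaled := PySem.Int.floordiv p.2 _down_scale_ratio
      let m_downscale_name := PySem.Int.toStr m_x_downscaled ++ "_" ++ PySem.Int.toStr m_y_downscaled
      if d.contains m_downscale_name = false then
        d.insert m_downscale_name (p.1, p.2, 1)
      else
        -- tile_grids[m_downscale_name]: the key is present, so the KeyError branch is unreachable
        let s := d.getD m_downscale_name (0, 0, 0)
        d.insert m_downscale_name (s.1 + p.1, s.2.1 + p.2, s.2.2 + 1)) PySem.Dict.empty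
  tile_grids.items.foldl (fun acc q =>
    acc ++ [(PySem.Int.floordiv q.2.1 q.2.2.2, PySem.Int.floordiv q.2.2.1 q.2.2.2)]) []

-- ===== PORT B =====
def concentric_circle_delete_duplicated_alt (_all_centers : List (Int × Int)) (_down_scale_ratio : Int) : List (Int × Int) :=
  let cells := _all_centers.map (fun p =>
    (PySem.Int.floordiv p.1 _down_scale_ratio, PySem.Int.floordiv p.2 _down_scale_ratio))
  (PySem.Set.ofList cells).foldl (fun acc cell =>
    let members := _all_centers.filter (fun p =>
      (PySem.Int.floordiv p.1 _down_scale_ratio, PySem.Int.floordiv p.2 _down_scale_ratio) == cell)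
    acc ++ [(PySem.Int.floordiv (members.map (fun m => m.1)).sum (members.length : Int),
             PySem.Int.floordiv (members.map (fun m => m.2)).sum (members.length : Int))]) []

-- ===== PRECONDITION & SPEC =====
-- Pre_ excludes exactly the inputs where Python A raises ZeroDivisionError: a zero
-- _down_scale_ratio with a nonempty list (B raises there too).
def Pre_concentric_circle_delete_duplicated (_all_centers : List (Int × Int)) (_down_scale_ratio : Int) : Prop :=
  _down_scale_ratio ≠ 0 ∨ _all_centers = []
instance (_all_centers : List (Int × Int)) (_down_scale_ratio : Int) : Decidable (Pre_concentric_circle_delete_duplicated _all_centers _down_scale_ratio) := by unfold Pre_concentric_circle_delete_duplicated; infer_instance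
def pvWitness_concentric_circle_delete_duplicated : (List (Int × Int)) × Int := ([(0, 0), (3, 1), (0, 1), (9, 9)], 4)
def Spec_concentric_circle_delete_duplicated (_all_centers : List (Int × Int)) (_down_scale_ratio : Int) (out : List (Int × Int)) : Prop := out = concentric_circle_delete_duplicated_alt _all_centers _down_scale_ratio
instance (_all_centers : List (Int × Int)) (_down_scale_ratio : Int) (out : List (Int × Int)) : Decidable (Spec_concentric_circle_delete_duplicated _all_centers _down_scale_ratio out) := by unfold Spec_concentric_circle_delete_duplicated; infer_instance

-- ===== CLAIM (what is proved, stated in full; the proofs are below) =====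
def Claim_equal_concentric_circle_delete_duplicated : Prop := ∀ (_all_centers : List (Int × Int)) (_down_scale_ratio : Int), Dom_concentric_circle_delete_duplicated _all_centers _down_scale_ratio → Pre_concentric_circle_delete_duplicated _all_centers _down_scale_ratio → Spec_concentric_circle_delete_duplicated _all_centers _down_scale_ratio (concentric_circle_delete_duplicated _all_centers _down_scale_ratio)

-- ===== LEMMAS AND PROOFS =====

-- ---- decimal digits: Nat.toDigits 10 is '_'/'-'-free and injective ----
theorem pvToDigitsCore_append (f : Nat) : ∀ (n : Nat) (l : List Char),
    Nat.toDigitsCore 10 f n l = Nat.toDigitsCore 10 f n [] ++ l := by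
  induction f with
  | zero => intro n l; simp [Nat.toDigitsCore]
  | succ f ih =>
    intro n l
    simp only [Nat.toDigitsCore]
    by_cases h : n / 10 = 0
    · simp [h]
    · simp only [if_neg h]
      rw [ih (n / 10) (Nat.digitChar (n % 10) :: l), ih (n / 10) [Nat.digitChar (n % 10)]]
      simp

theorem pvToDigitsCore_fuel : ∀ (n f g : Nat), n ≤ f → n ≤ g →
    Nat.toDigitsCore 10 (f + 1) n [] = Nat.toDigitsCore 10 (g + 1) n [] := by
  intro n
  induction n using Nat.strong_induction_on with
  | _ n ih =>
    intro f g hf hg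
    simp only [Nat.toDigitsCore]
    by_cases h : n / 10 = 0
    · simp [h]
    · simp only [if_neg h]
      obtain ⟨f', rfl⟩ : ∃ f', f = f' + 1 := ⟨f - 1, by omega⟩
      obtain ⟨g', rfl⟩ : ∃ g', g = g' + 1 := ⟨g - 1, by omega⟩
      rw [pvToDigitsCore_append (f' + 1), pvToDigitsCore_append (g' + 1)]
      have hlt : n / 10 < n := Nat.div_lt_self (by omega) (by omega)
      rw [ih (n / 10) hlt f' g' (by omega) (by omega)]

theorem pvDD_lt {n : Nat} (h : n < 10) : Nat.toDigits 10 n = [Nat.digitChar n] := by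
  simp only [Nat.toDigits, Nat.toDigitsCore]
  have : n / 10 = 0 := by omega
  simp [this, Nat.mod_eq_of_lt h]

theorem pvDD_ge {n : Nat} (h : 10 ≤ n) :
    Nat.toDigits 10 n = Nat.toDigits 10 (n / 10) ++ [Nat.digitChar (n % 10)] := by
  simp only [Nat.toDigits, Nat.toDigitsCore]
  have h0 : ¬ (n / 10 = 0) := by omega
  simp only [if_neg h0]
  rw [pvToDigitsCore_append n]
  congr 1
  obtain ⟨n', rfl⟩ : ∃ n', n = n' + 1 := ⟨n - 1, by omega⟩
  exact pvToDigitsCore_fuel (((n' + 1) / 10)) n' ((n' + 1) / 10) (by omega) (le_refl _)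

theorem pvDD_ne_nil (n : Nat) : Nat.toDigits 10 n ≠ [] := by
  by_cases h : n < 10
  · rw [pvDD_lt h]; simp
  · rw [pvDD_ge (by omega)]; simp

theorem pvMem_DD (n : Nat) : ∀ c ∈ Nat.toDigits 10 n, ∃ m, m < 10 ∧ c = Nat.digitChar m := by
  induction n using Nat.strong_induction_on with
  | _ n ih =>
    by_cases h : n < 10
    · rw [pvDD_lt h]; intro c hc; simp at hc; exact ⟨n, h, hc⟩
    · rw [pvDD_ge (by omega)]
      intro c hc
      rcases List.mem_append.mp hc with hc | hc
      · exact ih (n / 10) (Nat.div_lt_self (by omega) (by omega)) c hc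
      · simp at hc; exact ⟨n % 10, by omega, hc⟩

theorem pvDigitChar_ne {m : Nat} (h : m < 10) : Nat.digitChar m ≠ '_' ∧ Nat.digitChar m ≠ '-' := by
  interval_cases m <;> decide

theorem pvDigitChar_inj {a b : Nat} (ha : a < 10) (hb : b < 10)
    (h : Nat.digitChar a = Nat.digitChar b) : a = b := by
  interval_cases a <;> interval_cases b <;> simp_all [Nat.digitChar]

theorem pvDD_inj : ∀ (m n : Nat), Nat.toDigits 10 m = Nat.toDigits 10 n → m = n := by
  intro m
  induction m using Nat.strong_induction_on with
  | _ m ih =>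
    intro n h
    by_cases hm : m < 10 <;> by_cases hn : n < 10
    · rw [pvDD_lt hm, pvDD_lt hn] at h
      exact pvDigitChar_inj hm hn (by simpa using h)
    · rw [pvDD_lt hm, pvDD_ge (show (10:Nat) ≤ n by omega)] at h
      have hlen := congrArg List.length h
      simp only [List.length_append, List.length_cons, List.length_nil] at hlen
      exact absurd (List.eq_nil_of_length_eq_zero (by omega)) (pvDD_ne_nil (n / 10))
    · rw [pvDD_ge (show (10:Nat) ≤ m by omega), pvDD_lt hn] at h
      have hlen := congrArg List.length h
      simp only [List.length_append, List.length_cons, List.length_nil] at hlen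
      exact absurd (List.eq_nil_of_length_eq_zero (l := Nat.toDigits 10 (m / 10)) (by omega)) (pvDD_ne_nil (m / 10))
    · rw [pvDD_ge (n := m) (by omega), pvDD_ge (n := n) (by omega)] at h
      have h2 := List.append_inj' h (by simp)
      obtain ⟨h3, h4⟩ := h2
      have hmod : m % 10 = n % 10 :=
        pvDigitChar_inj (by omega) (by omega) (by simpa using h4)
      have hdiv : m / 10 = n / 10 :=
        ih (m / 10) (Nat.div_lt_self (by omega) (by omega)) (n / 10) h3
      omega

theorem pvToChars_no_underscore (n : Int) : '_' ∉ PySem.Int.toChars n := by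
  simp only [PySem.Int.toChars]
  split
  · intro hmem
    rcases List.mem_cons.mp hmem with h | h
    · exact absurd h.symm (by decide)
    · obtain ⟨m, hm, he⟩ := pvMem_DD _ _ h
      exact (pvDigitChar_ne hm).1 he.symm
  · intro hmem
    obtain ⟨m, hm, he⟩ := pvMem_DD _ _ hmem
    exact (pvDigitChar_ne hm).1 he.symm

theorem pvNeg_not_mem_DD (n : Nat) : '-' ∉ Nat.toDigits 10 n := by
  intro h
  obtain ⟨m, hm, he⟩ := pvMem_DD _ _ h
  exact (pvDigitChar_ne hm).2 he.symm

theorem pvToChars_inj {a b : Int} (h : PySem.Int.toChars a = PySem.Int.toChars b) : a = b := by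
  simp only [PySem.Int.toChars] at h
  split at h <;> split at h
  · rename_i ha hb
    have := pvDD_inj _ _ (by simpa using h)
    omega
  · rename_i ha hb
    exact absurd (h ▸ List.mem_cons_self ..) (pvNeg_not_mem_DD _)
  · rename_i ha hb
    exact absurd (h.symm ▸ List.mem_cons_self ..) (pvNeg_not_mem_DD _)
  · rename_i ha hb
    have := pvDD_inj _ _ h
    omega

theorem pvSplit_underscore : ∀ (a : List Char) (b : List Char) (c : List Char) (d : List Char),
    '_' ∉ a → '_' ∉ c → a ++ '_' :: b = c ++ '_' :: d → a = c ∧ b = d := by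
  intro a
  induction a with
  | nil =>
    intro b c d _ hc h
    cases c with
    | nil => simp_all
    | cons x xs =>
      simp at h
      exact absurd (h.1 ▸ List.mem_cons_self ..) hc
  | cons x xs ih =>
    intro b c d ha hc h
    cases c with
    | nil =>
      simp at h
      exact absurd (h.1 ▸ List.mem_cons_self ..) ha
    | cons y ys =>
      simp at h
      obtain ⟨rfl, h2⟩ := h
      have := ih b ys d (fun hm => ha (List.mem_cons_of_mem _ hm))
        (fun hm => hc (List.mem_cons_of_mem _ hm)) h2
      simp_all

-- ---- the '%d_%d' key and its injectivity ----
def pvEnc (c : Int × Int) : String := PySem.Int.toStr c.1 ++ "_" ++ PySem.Int.toStr c.2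

theorem pvEnc_inj {c₁ c₂ : Int × Int} (h : pvEnc c₁ = pvEnc c₂) : c₁ = c₂ := by
  have hl := congrArg String.toList h
  simp only [pvEnc, String.toList_append, PySem.Int.toList_toStr] at hl
  have hu : "_".toList = ['_'] := rfl
  rw [hu, List.append_assoc, List.append_assoc, List.singleton_append, List.singleton_append] at hl
  obtain ⟨h1, h2⟩ := pvSplit_underscore _ _ _ _
    (pvToChars_no_underscore _) (pvToChars_no_underscore _) hl
  exact Prod.ext (pvToChars_inj h1) (pvToChars_inj h2)

theorem pvEnc_beq (a b : Int × Int) : (pvEnc a == pvEnc b) = (a == b) := by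
  by_cases h : a = b
  · subst h; simp
  · have hne : pvEnc a ≠ pvEnc b := fun he => h (pvEnc_inj he)
    simp [h, hne]

-- ---- grouping helpers ----
def pvCell (r : Int) (p : Int × Int) : Int × Int :=
  (PySem.Int.floordiv p.1 r, PySem.Int.floordiv p.2 r)
def pvKey (r : Int) (p : Int × Int) : String := pvEnc (pvCell r p)
def pvTAdd (a b : Int × Int × Int) : Int × Int × Int :=
  (a.1 + b.1, a.2.1 + b.2.1, a.2.2 + b.2.2)
def pvPack (l : List (Int × Int)) : Int × Int × Int :=
  ((l.map (fun m => m.1)).sum, (l.map (fun m => m.2)).sum, (l.length : Int))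

theorem pvFoldl_append {α β : Type} (g : α → β) (l : List α) : ∀ acc : List β,
    l.foldl (fun acc x => acc ++ [g x]) acc = acc ++ l.map g := by
  induction l with
  | nil => intro acc; simp
  | cons x xs ih => intro acc; simp [ih]

-- A's loop body is an insert at the encoded cell key of the updated running triple
theorem pvA_foldl_eq (r : Int) :
    (fun (d : PySem.Dict String (Int × Int × Int)) (p : Int × Int) =>
      let m_x_downscaled := PySem.Int.floordiv p.1 r
      let m_y_downscaled := PySem.Int.floordiv p.2 r
      let m_downscale_name := PySem.Int.toStr m_x_downscaled ++ "_" ++ PySem.Int.toStr m_y_downscaled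
      if d.contains m_downscale_name = false then
        d.insert m_downscale_name (p.1, p.2, 1)
      else
        let s := d.getD m_downscale_name (0, 0, 0)
        d.insert m_downscale_name (s.1 + p.1, s.2.1 + p.2, s.2.2 + 1))
    = fun d p => d.insert (pvKey r p) (pvTAdd (d.getD (pvKey r p) (0, 0, 0)) (p.1, p.2, 1)) := by
  funext d p
  show (if d.contains (pvKey r p) = false then _ else _) = _
  by_cases hc : d.contains (pvKey r p) = false
  · rw [if_pos hc]
    rw [PySem.Dict.getD_of_not_contains _ _ hc]
    simp [pvTAdd, pvKey, pvEnc, pvCell]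
  · rw [if_neg hc]
    rfl

theorem pvGetD_foldl (r : Int) (l : List (Int × Int)) :
    ∀ (d : PySem.Dict String (Int × Int × Int)) (s : String),
    (l.foldl (fun d p => d.insert (pvKey r p) (pvTAdd (d.getD (pvKey r p) (0, 0, 0)) (p.1, p.2, 1))) d).getD s (0, 0, 0)
      = pvTAdd (d.getD s (0, 0, 0)) (pvPack (l.filter (fun p => pvKey r p == s))) := by
  induction l with
  | nil => intro d s; simp [pvPack, pvTAdd]
  | cons x xs ih =>
    intro d s
    simp only [List.foldl_cons, List.filter_cons]
    rw [ih]
    rw [PySem.Dict.getD_insert]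
    by_cases h : s = pvKey r x
    · have hb : (pvKey r x == s) = true := by simp [h]
      subst h
      rw [if_pos rfl, hb]
      simp only [if_true]
      simp only [pvTAdd, pvPack, List.map_cons, List.sum_cons, List.length_cons]
      refine Prod.ext (by ring) (Prod.ext (by ring) ?_)
      push_cast
      ring
    · have hb : (pvKey r x == s) = false := by simp [Ne.symm h]
      rw [if_neg h, hb]
      simp only [Bool.false_eq_true, if_false]

theorem pvOfList_map (l : List (Int × Int)) :
    PySem.Set.ofList (l.map pvEnc) = (PySem.Set.ofList l).map pvEnc := by
  induction l with
  | nil => rfl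
  | cons x xs ih =>
    rw [List.map_cons, PySem.Set.ofList_cons, PySem.Set.ofList_cons, ih]
    rw [List.map_cons]
    congr 1
    show List.filter _ (List.map pvEnc (PySem.Set.ofList xs)) = List.map pvEnc (List.filter _ (PySem.Set.ofList xs))
    rw [List.filter_map]
    congr 1
    apply List.filter_congr
    intro y _
    show (! (pvEnc y == pvEnc x)) = (! (y == x))
    rw [pvEnc_beq]

theorem pvTAdd_zero_left (t : Int × Int × Int) : pvTAdd (0, 0, 0) t = t := by
  simp [pvTAdd]

theorem pvMain (centers : List (Int × Int)) (r : Int) :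
    concentric_circle_delete_duplicated centers r
      = concentric_circle_delete_duplicated_alt centers r := by
  simp only [concentric_circle_delete_duplicated, concentric_circle_delete_duplicated_alt]
  rw [pvA_foldl_eq r]
  rw [pvFoldl_append, pvFoldl_append, List.nil_append, List.nil_append]
  have hnodup : (centers.foldl (fun d p => d.insert (pvKey r p)
      (pvTAdd (d.getD (pvKey r p) (0, 0, 0)) (p.1, p.2, 1))) PySem.Dict.empty).keys.Nodup := by
    exact PySem.Dict.nodup_keys_foldl_insert_key centers (pvKey r) _ _ (by simp)
  rw [PySem.Dict.items_eq_map_keys _ hnodup (0, 0, 0)]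
  rw [PySem.Dict.keys_foldl_insert_key centers (pvKey r)
    (fun d p => pvTAdd (d.getD (pvKey r p) (0, 0, 0)) (p.1, p.2, 1)) PySem.Dict.empty]
  rw [show (PySem.Dict.empty : PySem.Dict String (Int × Int × Int)).keys = [] from rfl]
  rw [PySem.Set.update_nil_left]
  have hkey : centers.map (pvKey r) = (centers.map (pvCell r)).map pvEnc := by
    rw [List.map_map]; rfl
  rw [hkey, pvOfList_map, List.map_map, List.map_map]
  apply List.map_congr_left
  intro c hc
  simp only [Function.comp]
  rw [pvGetD_foldl]
  rw [show (PySem.Dict.empty : PySem.Dict String (Int × Int × Int)).getD _ (0, 0, 0) = (0, 0, 0) from rfl]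
  rw [pvTAdd_zero_left]
  have hfil : centers.filter (fun p => pvKey r p == pvEnc c)
      = centers.filter (fun p => (PySem.Int.floordiv p.1 r, PySem.Int.floordiv p.2 r) == c) := by
    apply List.filter_congr
    intro p _
    rw [show pvKey r p = pvEnc (pvCell r p) from rfl, pvEnc_beq]
    rfl
  rw [hfil]
  rfl

-- ===== VERDICT (by name: the statement is the Claim_ definition above) =====
theorem concentric_circle_delete_duplicated_spec : Claim_equal_concentric_circle_delete_duplicated := by
  intro centers r _ _
  unfold Spec_concentric_circle_delete_duplicated
  exact pvMain centers r
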